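-- pv_equiv track=rewrite | github.com/guoliangxd/interview | huawei/Python/passwdTrans.py | passwdTrans
-- ===== SOURCE A (Python) =====
-- def passwdTrans(passwd):
--     result = ''
--     for char in passwd:
--         if char.isupper():
--             if char == 'Z':
--                 result += 'a'
--             else:
--                  result += chr(ord(char.lower()) + 1)
--         elif char.islower():
--              if char in 'abc':
--                  result += '2'
--              elif char in 'def':
--                  result += '3'
--              elif char in 'ghi':
--                  result += '4'
--              elif char in 'jkl':
--                  result += '5'
--              elif char in 'mno':
--                  result += '6'
--              elif char in 'pqrs':
--                  result += '7'
--              elif char in 'tuv':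
--                  result += '8'
--              elif char in 'wxyz':
--                  result += '9'
--         else:
--              result += char
--     return result
-- ===== SOURCE B (Python) =====
-- def passwdTrans(passwd):
--     out = []
--     for c in passwd:
--         o = ord(c)
--         if 65 <= o <= 90:
--             # rotate within the alphabet and drop to lowercase: one formula, Z wraps to 'a'
--             out.append(chr((o - 64) % 26 + 97))
--         elif 97 <= o <= 122:
--             # closed-form phone-keypad digit from the letter index
--             i = o - 97
--             out.append(chr(50 + (i - (i >= 18) - (i >= 25)) // 3))
--         else:
--             out.append(c)
--     return ''.join(out)
-- ===== Notes on version B (the rewrite author's own statement) =====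
-- stated objective: alternative
-- what changed: Replaces the if/elif branch cascade and membership tests with closed-form code-point arithmetic: uppercase is handled by one modular rotation chr((ord(c)-64)%26+97) (so Z needs no special case), and the keypad digit is computed by the formula 50+(i-(i>=18)-(i>=25))//3 on the letter index instead of eight membership tests.
import Mathlib
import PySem

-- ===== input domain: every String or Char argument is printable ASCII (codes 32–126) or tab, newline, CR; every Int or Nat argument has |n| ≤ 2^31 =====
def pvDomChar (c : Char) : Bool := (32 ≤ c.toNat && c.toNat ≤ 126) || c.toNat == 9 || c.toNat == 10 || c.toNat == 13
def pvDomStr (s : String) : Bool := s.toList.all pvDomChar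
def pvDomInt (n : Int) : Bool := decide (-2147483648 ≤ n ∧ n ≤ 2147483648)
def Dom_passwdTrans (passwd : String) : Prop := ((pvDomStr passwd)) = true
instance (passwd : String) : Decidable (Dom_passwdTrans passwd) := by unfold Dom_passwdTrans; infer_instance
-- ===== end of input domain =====

-- B replaces A's if/elif cascade and membership tests by closed-form code-point
-- arithmetic (one modular rotation for uppercase, one division formula for the
-- keypad digit); same cost, different structure.

-- ===== PORT A =====
-- the loop body of A, as a named helper (same branches, same order)
def passwdTransStep (result : String) (char : Char) : String :=
  if PySem.Chars.isupper char then
    if char = 'Z' then result ++ "a"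
    else result ++ String.ofList [Char.ofNat ((PySem.Chars.lowerChar char).toNat + 1)]
  else if PySem.Chars.islower char then
    if ['a','b','c'].contains char then result ++ "2"
    else if ['d','e','f'].contains char then result ++ "3"
    else if ['g','h','i'].contains char then result ++ "4"
    else if ['j','k','l'].contains char then result ++ "5"
    else if ['m','n','o'].contains char then result ++ "6"
    else if ['p','q','r','s'].contains char then result ++ "7"
    else if ['t','u','v'].contains char then result ++ "8"
    else if ['w','x','y','z'].contains char then result ++ "9"
    else result
  else result ++ String.ofList [char]

def passwdTrans (passwd : String) : String :=
  passwd.toList.foldl passwdTransStep ""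

-- ===== PORT B =====
-- Source B's loop body: the replacement string for one character, by arithmetic on ord(c)
def passwdTransAltStep (c : Char) : String :=
  let o : Int := (c.toNat : Int)
  if 65 ≤ o ∧ o ≤ 90 then
    String.ofList [Char.ofNat ((PySem.Int.mod (o - 64) 26 + 97).toNat)]
  else if 97 ≤ o ∧ o ≤ 122 then
    let i : Int := o - 97
    String.ofList [Char.ofNat ((50 + PySem.Int.floordiv
      (i - (if 18 ≤ i then 1 else 0) - (if 25 ≤ i then 1 else 0)) 3).toNat)]
  else String.ofList [c]

-- Source B: out = []; for c: out.append(step c); return ''.join(out)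
def passwdTrans_alt (passwd : String) : String :=
  String.join (passwd.toList.foldl (fun out c => out ++ [passwdTransAltStep c]) [])

-- ===== PRECONDITION & SPEC =====
def Spec_passwdTrans (passwd : String) (out : String) : Prop := out = passwdTrans_alt passwd
instance (passwd : String) (out : String) : Decidable (Spec_passwdTrans passwd out) := by unfold Spec_passwdTrans; infer_instance

-- ===== CLAIM (what is proved, stated in full; the proofs are below) =====
def Claim_equal_passwdTrans : Prop := ∀ (passwd : String), Dom_passwdTrans passwd → Spec_passwdTrans passwd (passwdTrans passwd)

-- ===== LEMMAS AND PROOFS =====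

/-- What A appends for one character. -/
def pieceA (char : Char) : String :=
  if PySem.Chars.isupper char then
    if char = 'Z' then "a"
    else String.ofList [Char.ofNat ((PySem.Chars.lowerChar char).toNat + 1)]
  else if PySem.Chars.islower char then
    if ['a','b','c'].contains char then "2"
    else if ['d','e','f'].contains char then "3"
    else if ['g','h','i'].contains char then "4"
    else if ['j','k','l'].contains char then "5"
    else if ['m','n','o'].contains char then "6"
    else if ['p','q','r','s'].contains char then "7"
    else if ['t','u','v'].contains char then "8"
    else if ['w','x','y','z'].contains char then "9"
    else ""
  else String.ofList [char]

set_option maxHeartbeats 1000000 in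
lemma passwdTransStep_eq (result : String) (c : Char) :
    passwdTransStep result c = result ++ pieceA c := by
  simp only [passwdTransStep, pieceA]
  split_ifs <;> simp

lemma foldl_append_shift (l : List String) : ∀ a : String,
    List.foldl (fun r s => r ++ s) a l = a ++ List.foldl (fun r s => r ++ s) "" l := by
  induction l with
  | nil => intro a; simp
  | cons x t ih =>
    intro a
    simp only [List.foldl_cons]
    rw [ih (a ++ x), ih ("" ++ x)]
    simp [String.append_assoc]

lemma passwdTrans_join (l : List Char) : ∀ acc : String,
    l.foldl passwdTransStep acc = acc ++ String.join (l.map pieceA) := by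
  induction l with
  | nil => intro acc; simp [String.join]
  | cons c t ih =>
    intro acc
    simp only [List.foldl_cons, List.map_cons, String.join]
    rw [passwdTransStep_eq acc c, ih]
    simp only [String.join]
    rw [foldl_append_shift (t.map pieceA) ("" ++ pieceA c)]
    simp [String.append_assoc]

lemma foldl_push (l : List Char) : ∀ acc : List String,
    l.foldl (fun out c => out ++ [passwdTransAltStep c]) acc = acc ++ l.map passwdTransAltStep := by
  induction l with
  | nil => intro acc; simp
  | cons c t ih => intro acc; simp [ih]

set_option maxHeartbeats 2000000 in
set_option maxRecDepth 8000 in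
lemma piece_eq_ofNat : ∀ n < 127, pieceA (Char.ofNat n) = passwdTransAltStep (Char.ofNat n) := by decide

lemma piece_eq (c : Char) (h : pvDomChar c = true) : pieceA c = passwdTransAltStep c := by
  have hlt : c.toNat < 127 := by
    unfold pvDomChar at h
    simp only [Bool.or_eq_true, Bool.and_eq_true, decide_eq_true_eq, beq_iff_eq] at h
    omega
  have := piece_eq_ofNat c.toNat hlt
  rwa [Char.ofNat_toNat] at this

-- ===== VERDICT (by name: the statement is the Claim_ definition above) =====
theorem passwdTrans_spec : Claim_equal_passwdTrans := by
  intro passwd hdom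
  unfold Spec_passwdTrans passwdTrans passwdTrans_alt
  rw [passwdTrans_join passwd.toList "", foldl_push passwd.toList []]
  have hmap : passwd.toList.map pieceA = passwd.toList.map passwdTransAltStep :=
    List.map_congr_left (fun c hc => piece_eq c ((List.all_eq_true.mp hdom) c hc))
  rw [← hmap]
  simp
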